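-- pv_equiv track=rewrite | github.com/doradame/serieBot | serieBot.py | _score_genre_match
-- ===== SOURCE A (Python) =====
-- def _score_genre_match(tv_genres, requested_genres):
--     """
--     Score how well a series matches the requested genres.
--     For sci-fi requests, prefer series with more 'sci-fi' indicators and fewer fantasy/drama indicators.
--
--     Args:
--         tv_genres: List of genre IDs for the TV show
--         requested_genres: List of genre names requested by user (e.g., ["sci-fi", "mystery"])
--
--     Returns:
--         int: Score indicating genre match quality
--     """
--     if not requested_genres:
--         return 0
--
--     # Map genre names to TMDB IDs
--     genre_map = {
--         "action": 10759,
--         "action & adventure": 10759,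
--         "adventure": 10759,
--         "animation": 16,
--         "comedy": 35,
--         "crime": 80,
--         "documentary": 99,
--         "drama": 18,
--         "family": 10751,
--         "fantasy": 10765,
--         "kids": 10762,
--         "mystery": 9648,
--         "news": 10763,
--         "reality": 10764,
--         "sci-fi": 10765,
--         "sci-fi & fantasy": 10765,
--         "science fiction": 10765,
--         "scifi": 10765,
--         "soap": 10766,
--         "talk": 10767,
--         "war & politics": 10768,
--         "western": 37
--     }
--
--     # Convert requested genres to IDs
--     requested_ids = set()
--     has_scifi_request = False
--     has_fantasy_request = False
--
--     for g in requested_genres: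
--         g_lower = g.lower().strip()
--         if g_lower in ["sci-fi", "scifi", "science fiction"]:
--             has_scifi_request = True
--             requested_ids.add(10765)
--         elif g_lower == "fantasy":
--             has_fantasy_request = True
--             requested_ids.add(10765)
--         elif g_lower in genre_map:
--             requested_ids.add(genre_map[g_lower])
--
--     # Base score: count how many requested genres match
--     base_score = len(requested_ids.intersection(set(tv_genres)))
--
--     # Special logic for sci-fi vs fantasy distinction
--     # Only apply if user specifically requested sci-fi (not fantasy)
--     if has_scifi_request and not has_fantasy_request and 10765 in tv_genres:
--         # User wants sci-fi, series has "Sci-Fi & Fantasy" genre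
--         # Now check for sci-fi indicators vs fantasy indicators
--
--         # Positive indicators for sci-fi (space, action, mystery, tech)
--         scifi_indicators = 0
--         if 10759 in tv_genres:  # Action & Adventure (often sci-fi)
--             scifi_indicators += 2
--         if 9648 in tv_genres:  # Mystery (often sci-fi thrillers)
--             scifi_indicators += 1
--         if 16 in tv_genres:  # Animation (often sci-fi anime)
--             scifi_indicators += 1
--
--         # Negative indicators (more fantasy/supernatural than sci-fi)
--         fantasy_indicators = 0
--         if 18 in tv_genres:  # Drama (common in fantasy/supernatural)
--             fantasy_indicators += 1
--         if 80 in tv_genres:  # Crime (supernatural crime, not sci-fi)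
--             fantasy_indicators += 2
--         if 10751 in tv_genres:  # Family (fairy tales, not sci-fi)
--             fantasy_indicators += 1
--
--         # Adjust score based on indicators
--         indicator_score = scifi_indicators - fantasy_indicators
--         base_score += indicator_score
--
--     return max(0, base_score)  # Don't go negative
-- ===== SOURCE B (Python) =====
-- # Inverted lookup: instead of mapping each requested name to an ID, walk the
-- # fixed ID table once and test which IDs were requested by name-set membership.
-- _ID_NAMES = [
--     (10759, ("action", "action & adventure", "adventure")),
--     (16, ("animation",)),
--     (35, ("comedy",)),
--     (80, ("crime",)),
--     (99, ("documentary",)),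
--     (18, ("drama",)),
--     (10751, ("family",)),
--     (10765, ("fantasy", "sci-fi", "sci-fi & fantasy", "science fiction", "scifi")),
--     (10762, ("kids",)),
--     (9648, ("mystery",)),
--     (10763, ("news",)),
--     (10764, ("reality",)),
--     (10766, ("soap",)),
--     (10767, ("talk",)),
--     (10768, ("war & politics",)),
--     (37, ("western",)),
-- ]
--
--
-- def _score_genre_match(tv_genres, requested_genres):
--     if not requested_genres:
--         return 0
--     names = {g.lower().strip() for g in requested_genres}
--     tv = set(tv_genres)
--     # Base score: one point per distinct TMDB id that is both on the show and
--     # named (under any alias) by the request.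
--     score = sum(1 for gid, aliases in _ID_NAMES
--                 if gid in tv and any(n in names for n in aliases))
--     # Sci-fi-vs-fantasy adjustment, expressed arithmetically.
--     wants_scifi = any(n in names for n in ("sci-fi", "scifi", "science fiction"))
--     if wants_scifi and "fantasy" not in names and 10765 in tv:
--         score += (2 * (10759 in tv) + (9648 in tv) + (16 in tv)
--                   - (18 in tv) - 2 * (80 in tv) - (10751 in tv))
--     return max(0, score)
-- ===== Notes on version B (the rewrite author's own statement) =====
-- stated objective: alternative
-- what changed: B inverts the lookup direction: instead of A's per-request loop that maps each name to an id, accumulates an id set and intersects it with the TV genres, B builds the set of normalized request names once and walks a fixed inverted id->aliases table, scoring each TV-side id by whether any of its aliases was requested; the sci-fi adjustment becomes one arithmetic expression instead of six if-branches.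
import Mathlib
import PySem

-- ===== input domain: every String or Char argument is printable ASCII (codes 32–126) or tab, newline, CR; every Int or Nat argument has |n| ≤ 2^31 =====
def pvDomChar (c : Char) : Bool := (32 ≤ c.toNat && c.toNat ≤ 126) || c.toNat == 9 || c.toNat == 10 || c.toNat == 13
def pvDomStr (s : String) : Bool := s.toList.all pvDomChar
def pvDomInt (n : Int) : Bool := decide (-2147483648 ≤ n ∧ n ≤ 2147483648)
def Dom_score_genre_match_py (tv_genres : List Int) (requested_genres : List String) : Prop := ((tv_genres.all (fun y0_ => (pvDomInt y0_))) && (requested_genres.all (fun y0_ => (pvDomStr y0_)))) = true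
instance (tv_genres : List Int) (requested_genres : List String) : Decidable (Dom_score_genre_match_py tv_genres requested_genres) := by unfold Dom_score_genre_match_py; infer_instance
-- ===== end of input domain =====

-- B inverts the lookup: instead of a per-request name→id loop it walks a fixed id→aliases
-- table once against the normalized request-name set (objective: alternative, same cost).

-- ===== PORT A =====
def pvGenreList : List (String × Int) :=
  [("action", 10759), ("action & adventure", 10759), ("adventure", 10759),
   ("animation", 16), ("comedy", 35), ("crime", 80), ("documentary", 99),
   ("drama", 18), ("family", 10751), ("fantasy", 10765), ("kids", 10762),
   ("mystery", 9648), ("news", 10763), ("reality", 10764), ("sci-fi", 10765),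
   ("sci-fi & fantasy", 10765), ("science fiction", 10765), ("scifi", 10765),
   ("soap", 10766), ("talk", 10767), ("war & politics", 10768), ("western", 37)]

def pvGenreMap : PySem.Dict String Int := PySem.Dict.ofList pvGenreList

def pvScifiNames : List String := ["sci-fi", "scifi", "science fiction"]

-- g.lower().strip(), used by both Pythons
def pvNorm (g : String) : String := PySem.Str.strip (PySem.Str.lower g)

-- the body of A's 'for g in requested_genres' loop (state: requested_ids, has_scifi, has_fantasy)
def pvStepA (st : PySem.Set Int × Bool × Bool) (g : String) : PySem.Set Int × Bool × Bool :=
  let g_lower := pvNorm g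
  if g_lower ∈ pvScifiNames then (PySem.Set.add st.1 10765, true, st.2.2)
  else if g_lower = "fantasy" then (PySem.Set.add st.1 10765, st.2.1, true)
  else if pvGenreMap.contains g_lower then (PySem.Set.add st.1 (pvGenreMap.getD g_lower 0), st.2.1, st.2.2)
  else st

def score_genre_match_py (tv_genres : List Int) (requested_genres : List String) : Int :=
  if requested_genres = [] then 0
  else
    let st := requested_genres.foldl pvStepA (PySem.Set.empty, false, false)
    let requested_ids := st.1
    let has_scifi_request := st.2.1
    let has_fantasy_request := st.2.2
    let base_score : Int := (PySem.Set.inter requested_ids (PySem.Set.ofList tv_genres)).length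
    let base_score :=
      if has_scifi_request && !has_fantasy_request && decide ((10765 : Int) ∈ tv_genres) then
        let scifi_indicators : Int :=
          (if (10759 : Int) ∈ tv_genres then 2 else 0) +
          (if (9648 : Int) ∈ tv_genres then 1 else 0) +
          (if (16 : Int) ∈ tv_genres then 1 else 0)
        let fantasy_indicators : Int :=
          (if (18 : Int) ∈ tv_genres then 1 else 0) +
          (if (80 : Int) ∈ tv_genres then 2 else 0) +
          (if (10751 : Int) ∈ tv_genres then 1 else 0)
        base_score + (scifi_indicators - fantasy_indicators)
      else base_score
    max 0 base_score

-- ===== PORT B =====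
-- the inverted table: each TMDB id with all request names that denote it
def pvIdNames : List (Int × List String) :=
  [(10759, ["action", "action & adventure", "adventure"]),
   (16, ["animation"]),
   (35, ["comedy"]),
   (80, ["crime"]),
   (99, ["documentary"]),
   (18, ["drama"]),
   (10751, ["family"]),
   (10765, ["fantasy", "sci-fi", "sci-fi & fantasy", "science fiction", "scifi"]),
   (10762, ["kids"]),
   (9648, ["mystery"]),
   (10763, ["news"]),
   (10764, ["reality"]),
   (10766, ["soap"]),
   (10767, ["talk"]),
   (10768, ["war & politics"]),
   (37, ["western"])]

def score_genre_match_py_alt (tv_genres : List Int) (requested_genres : List String) : Int :=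
  if requested_genres = [] then 0
  else
    let names : PySem.Set String := PySem.Set.ofList (requested_genres.map pvNorm)
    let tv : PySem.Set Int := PySem.Set.ofList tv_genres
    let score : Int := (pvIdNames.filter
      (fun p => PySem.Set.contains tv p.1 && p.2.any (fun n => PySem.Set.contains names n))).length
    let wants_scifi := pvScifiNames.any (fun n => PySem.Set.contains names n)
    let score :=
      if wants_scifi && !PySem.Set.contains names "fantasy" && PySem.Set.contains tv 10765 then
        score + (2 * (if (10759 : Int) ∈ tv then (1:Int) else 0) + (if (9648 : Int) ∈ tv then (1:Int) else 0)
          + (if (16 : Int) ∈ tv then (1:Int) else 0) - (if (18 : Int) ∈ tv then (1:Int) else 0)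
          - 2 * (if (80 : Int) ∈ tv then (1:Int) else 0) - (if (10751 : Int) ∈ tv then (1:Int) else 0))
      else score
    max 0 score

-- ===== PRECONDITION & SPEC =====
def Spec_score_genre_match_py (tv_genres : List Int) (requested_genres : List String) (out : Int) : Prop := out = score_genre_match_py_alt tv_genres requested_genres
instance (tv_genres : List Int) (requested_genres : List String) (out : Int) : Decidable (Spec_score_genre_match_py tv_genres requested_genres out) := by unfold Spec_score_genre_match_py; infer_instance

-- ===== CLAIM (what is proved, stated in full; the proofs are below) =====
def Claim_equal_score_genre_match_py : Prop := ∀ (tv_genres : List Int) (requested_genres : List String), Dom_score_genre_match_py tv_genres requested_genres → Spec_score_genre_match_py tv_genres requested_genres (score_genre_match_py tv_genres requested_genres)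

-- ===== LEMMAS AND PROOFS =====

theorem pvMap_mk : pvGenreMap = PySem.Dict.mk pvGenreList := by decide

theorem pvGet_iff (m : String) (v : Int) :
    pvGenreMap.get? m = some v ↔ (m, v) ∈ pvGenreList := by
  have h := PySem.Dict.get?_eq_some_iff_mem_items (d := pvGenreMap) (k := m) (v := v) (by decide)
  rw [h, pvMap_mk]

-- one step of A's loop, in terms of the dictionary lookup
theorem pvStepA_char (st : PySem.Set Int × Bool × Bool) (g : String) (x : Int) :
    (x ∈ (pvStepA st g).1 ↔ x ∈ st.1 ∨ pvGenreMap.get? (pvNorm g) = some x) ∧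
    (pvStepA st g).2.1 = (st.2.1 || decide (pvNorm g ∈ pvScifiNames)) ∧
    (pvStepA st g).2.2 = (st.2.2 || decide (pvNorm g = "fantasy")) := by
  unfold pvStepA
  by_cases h1 : pvNorm g ∈ pvScifiNames
  · have h2 : pvNorm g ≠ "fantasy" := by
      rcases (by simpa [pvScifiNames] using h1) with h | h | h <;> rw [h] <;> decide
    have hg : pvGenreMap.get? (pvNorm g) = some 10765 := by
      rcases (by simpa [pvScifiNames] using h1) with h | h | h <;> rw [h] <;> decide
    simp [h1, h2, hg, PySem.Set.mem_add, eq_comm]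
  · by_cases h2 : pvNorm g = "fantasy"
    · have hg : pvGenreMap.get? "fantasy" = some 10765 := by decide
      simp [h2, hg, PySem.Set.mem_add, pvScifiNames, eq_comm]
    · cases hg : pvGenreMap.get? (pvNorm g) with
      | none =>
        have hc : pvGenreMap.contains (pvNorm g) = false := by
          rw [PySem.Dict.contains_eq_isSome_get?, hg]; rfl
        simp [h1, h2, hc]
      | some v =>
        have hc : pvGenreMap.contains (pvNorm g) = true := by
          rw [PySem.Dict.contains_eq_isSome_get?, hg]; rfl
        have hgd : pvGenreMap.getD (pvNorm g) 0 = v := by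
          rw [PySem.Dict.getD_eq_get?_getD, hg]; rfl
        simp [h1, h2, hc, hgd, PySem.Set.mem_add, eq_comm]

theorem pvFoldA_mem (l : List String) (st : PySem.Set Int × Bool × Bool) (x : Int) :
    x ∈ (l.foldl pvStepA st).1 ↔ x ∈ st.1 ∨ ∃ g ∈ l, pvGenreMap.get? (pvNorm g) = some x := by
  induction l generalizing st with
  | nil => simp
  | cons g l ih =>
    rw [List.foldl_cons, ih, (pvStepA_char st g x).1]
    simp only [List.mem_cons]
    constructor
    · rintro ((h | h) | ⟨a, ha, h⟩)
      · exact Or.inl h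
      · exact Or.inr ⟨g, Or.inl rfl, h⟩
      · exact Or.inr ⟨a, Or.inr ha, h⟩
    · rintro (h | ⟨a, (rfl | ha), h⟩)
      · exact Or.inl (Or.inl h)
      · exact Or.inl (Or.inr h)
      · exact Or.inr ⟨a, ha, h⟩

theorem pvFoldA_scifi (l : List String) (st : PySem.Set Int × Bool × Bool) :
    (l.foldl pvStepA st).2.1 = (st.2.1 || l.any (fun g => decide (pvNorm g ∈ pvScifiNames))) := by
  induction l generalizing st with
  | nil => simp
  | cons g l ih =>
    rw [List.foldl_cons, ih, (pvStepA_char st g 0).2.1]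
    simp [Bool.or_assoc]

theorem pvFoldA_fantasy (l : List String) (st : PySem.Set Int × Bool × Bool) :
    (l.foldl pvStepA st).2.2 = (st.2.2 || l.any (fun g => decide (pvNorm g = "fantasy"))) := by
  induction l generalizing st with
  | nil => simp
  | cons g l ih =>
    rw [List.foldl_cons, ih, (pvStepA_char st g 0).2.2]
    simp [Bool.or_assoc]

theorem pvFoldA_nodup (l : List String) (st : PySem.Set Int × Bool × Bool) (h : st.1.Nodup) :
    (l.foldl pvStepA st).1.Nodup := by
  induction l generalizing st with
  | nil => exact h
  | cons g l ih =>
    apply ih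
    show (pvStepA st g).1.Nodup
    simp only [pvStepA]
    split_ifs <;> first | (apply PySem.Set.nodup_add <;> assumption) | exact h

-- every value of the name→id map is an id of the inverted table
theorem pvRange (x : Int) (h : ∃ m, (m, x) ∈ pvGenreList) : x ∈ pvIdNames.map Prod.fst := by
  obtain ⟨m, hm⟩ := h
  have hx : x ∈ pvGenreList.map Prod.snd := List.mem_map_of_mem hm
  have hall : ∀ v ∈ pvGenreList.map Prod.snd, v ∈ pvIdNames.map Prod.fst := by decide
  exact hall x hx

-- each table row lists exactly the names the map sends to that id
theorem pvRow (p : Int × List String) (hrow : p ∈ pvIdNames) (m : String) :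
    m ∈ p.2 ↔ (m, p.1) ∈ pvGenreList := by
  obtain ⟨gid, ns⟩ := p
  show m ∈ ns ↔ (m, gid) ∈ pvGenreList
  have hns : ns = (pvGenreList.filter (fun q => q.2 == gid)).map Prod.fst := by
    fin_cases hrow <;> decide
  subst hns
  simp only [List.mem_map, List.mem_filter, beq_iff_eq]
  constructor
  · rintro ⟨⟨a, b⟩, ⟨hab, hb⟩, rfl⟩
    exact hb ▸ hab
  · intro h
    exact ⟨(m, gid), ⟨h, rfl⟩, rfl⟩

-- two nodup lists with the same members have the same length
theorem pvLen_eq {l m : List Int} (hl : l.Nodup) (hm : m.Nodup) (h : ∀ x, x ∈ l ↔ x ∈ m) :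
    l.length = m.length := by
  have := (List.perm_ext_iff_of_nodup hl hm).mpr h
  exact this.length_eq

theorem score_genre_match_py_spec : Claim_equal_score_genre_match_py := by
  unfold Claim_equal_score_genre_match_py Spec_score_genre_match_py
  intro tv req _
  unfold score_genre_match_py score_genre_match_py_alt
  by_cases hreq : req = []
  · simp [hreq]
  · simp only [hreq, if_false]
    set st := req.foldl pvStepA (PySem.Set.empty, false, false) with hst
    have hmemS : ∀ x, x ∈ st.1 ↔ ∃ g ∈ req, pvGenreMap.get? (pvNorm g) = some x := by
      intro x; rw [hst, pvFoldA_mem]; simp [PySem.Set.empty]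
    have hnames : ∀ n, PySem.Set.contains (PySem.Set.ofList (req.map pvNorm)) n
        = decide (∃ g ∈ req, pvNorm g = n) := by
      intro n
      by_cases h : ∃ g ∈ req, pvNorm g = n
      · simp only [h, decide_true]
        rw [PySem.Set.contains_iff]
        rw [PySem.Set.mem_ofList]
        obtain ⟨g, hg, rfl⟩ := h
        exact List.mem_map_of_mem hg
      · simp only [h, decide_false]
        rw [Bool.eq_false_iff, Ne, PySem.Set.contains_iff, PySem.Set.mem_ofList]
        intro hmem
        obtain ⟨g, hg, hgn⟩ := List.mem_map.mp hmem
        exact h ⟨g, hg, hgn⟩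
    -- flags
    have hsc : st.2.1 = pvScifiNames.any (fun n => PySem.Set.contains (PySem.Set.ofList (req.map pvNorm)) n) := by
      rw [hst, pvFoldA_scifi]
      simp only [Bool.false_or, List.any_eq, hnames]
      rw [Bool.eq_iff_iff]
      simp only [decide_eq_true_eq]
      constructor
      · rintro ⟨g, hg, hmem⟩; exact ⟨pvNorm g, hmem, g, hg, rfl⟩
      · rintro ⟨n, hn, g, hg, rfl⟩; exact ⟨g, hg, hn⟩
    have hfa : st.2.2 = PySem.Set.contains (PySem.Set.ofList (req.map pvNorm)) "fantasy" := by
      rw [hst, pvFoldA_fantasy, hnames, Bool.false_or, Bool.eq_iff_iff]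
      simp
    -- base score
    have hnd : st.1.Nodup := by rw [hst]; exact pvFoldA_nodup _ _ List.nodup_nil
    have hbase : ((PySem.Set.inter st.1 (PySem.Set.ofList tv)).length : Int)
        = ((pvIdNames.filter (fun p => PySem.Set.contains (PySem.Set.ofList tv) p.1
            && p.2.any (fun n => PySem.Set.contains (PySem.Set.ofList (req.map pvNorm)) n))).length : Int) := by
      have hfilt : (pvIdNames.filter (fun p => PySem.Set.contains (PySem.Set.ofList tv) p.1
            && p.2.any (fun n => PySem.Set.contains (PySem.Set.ofList (req.map pvNorm)) n))).length
          = ((pvIdNames.map Prod.fst).filter (fun i => decide (i ∈ st.1) && decide (i ∈ (PySem.Set.ofList tv : List Int)))).length := by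
        rw [← List.countP_eq_length_filter, ← List.countP_eq_length_filter, List.countP_map]
        apply List.countP_congr
        intro p hp
        simp only [Function.comp_apply, Bool.and_eq_true, List.any_eq_true, decide_eq_true_eq]
        rw [PySem.Set.contains_eq_listContains]
        constructor
        · rintro ⟨htv, n, hn, hcn⟩
          refine ⟨?_, by simpa [PySem.Set.contains_iff] using htv⟩
          rw [hmemS]
          rw [hnames] at hcn
          obtain ⟨g, hg, rfl⟩ := of_decide_eq_true hcn
          exact ⟨g, hg, (pvGet_iff _ _).mpr ((pvRow p hp (pvNorm g)).mp hn)⟩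
        · rintro ⟨hs, htv⟩
          refine ⟨by simpa [PySem.Set.contains_iff] using htv, ?_⟩
          rw [hmemS] at hs
          obtain ⟨g, hg, hget⟩ := hs
          refine ⟨pvNorm g, ?_, ?_⟩
          · exact (pvRow p hp (pvNorm g)).mpr ((pvGet_iff _ _).mp hget)
          · rw [hnames]; exact decide_eq_true ⟨g, hg, rfl⟩
      rw [hfilt]
      congr 1
      apply pvLen_eq (PySem.Set.nodup_inter _ _ hnd) (List.Nodup.filter _ (by decide))
      intro x
      simp only [PySem.Set.mem_inter, List.mem_filter, List.mem_map,
        Bool.and_eq_true, decide_eq_true_eq]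
      constructor
      · rintro ⟨hx, htv⟩
        refine ⟨?_, hx, htv⟩
        have := (hmemS x).mp hx
        obtain ⟨g, hg, hget⟩ := this
        have hx' := pvRange x ⟨pvNorm g, (pvGet_iff _ _).mp hget⟩
        simpa using hx'
      · rintro ⟨_, hx, htv⟩; exact ⟨hx, htv⟩
    -- put it together
    have hctv : ∀ x : Int, PySem.Set.contains (PySem.Set.ofList tv) x = decide (x ∈ tv) := by
      intro x
      by_cases h : x ∈ tv
      · simp only [h, decide_true]
        rw [PySem.Set.contains_iff, PySem.Set.mem_ofList]; exact h
      · simp only [h, decide_false]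
        rw [Bool.eq_false_iff, Ne, PySem.Set.contains_iff, PySem.Set.mem_ofList]; exact h
    simp only [hsc, hfa, hbase, hctv, PySem.Set.mem_ofList]
    congr 1
    split_ifs <;> ring

-- ===== VERDICT (by name: the statement is the Claim_ definition above) =====
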